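-- pv_equiv track=rewrite | github.com/ccalvar/Libros | Pensamiento Computacional en Práctica La Lógica Universal del Código a C++, Java, C#, JavaScript y Python/Codigo Python/Capitulo7.py | MostrarListaVentas
-- ===== SOURCE A (Python) =====
-- def RellenarEspacios(dato, tamano):
--     return dato.ljust(tamano)
--
-- def ObtenerUltimaPosicion(matriz):
--     ultima_posicion = -1
--     for i in range(len(matriz)):
--         if matriz[i][0] is not None and matriz[i][0] != '':
--             ultima_posicion = i
--     return ultima_posicion
--
-- def MostrarVenta(venta):
--     idticket = RellenarEspacios(venta[0], 6)
--     codigo = RellenarEspacios(venta[1], 5)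
--     producto = RellenarEspacios(venta[2], 30)
--     precio = RellenarEspacios(venta[3], 10)
--     cantidad = RellenarEspacios(venta[4], 10)
--     cadena = idticket + codigo + producto + precio + cantidad
--     return cadena
--
-- def MostrarListaVentas(ventas):
--     posventas = ObtenerUltimaPosicion(ventas)
--     salida = ""
--     for ciclo in range(posventas + 1):
--         venta = [ventas[ciclo][0], ventas[ciclo][1], ventas[ciclo][2], ventas[ciclo][3], ventas[ciclo][4]]
--         cadena = MostrarVenta(venta)
--         salida += cadena + "\n"
--     return salida
-- ===== SOURCE B (Python) =====
-- def MostrarListaVentas(ventas):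
--     out = None  # None = no non-empty first cell seen yet (scanning from the end)
--     for fila in reversed(ventas):
--         if out is None:
--             if fila[0] is None or fila[0] == '':
--                 continue
--             out = ""
--         out = (fila[0].ljust(6) + fila[1].ljust(5) + fila[2].ljust(30)
--                + fila[3].ljust(10) + fila[4].ljust(10) + "\n") + out
--     return out if out is not None else ""
-- ===== Notes on version B (the rewrite author's own statement) =====
-- stated objective: alternative
-- what changed: B fuses A's two staged passes (full forward scan for the last non-empty row, then an index loop appending lines) into one backward pass with an Option accumulator that builds the output back-to-front, formatting each row as soon as the pass knows it belongs to the output.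
import Mathlib
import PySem

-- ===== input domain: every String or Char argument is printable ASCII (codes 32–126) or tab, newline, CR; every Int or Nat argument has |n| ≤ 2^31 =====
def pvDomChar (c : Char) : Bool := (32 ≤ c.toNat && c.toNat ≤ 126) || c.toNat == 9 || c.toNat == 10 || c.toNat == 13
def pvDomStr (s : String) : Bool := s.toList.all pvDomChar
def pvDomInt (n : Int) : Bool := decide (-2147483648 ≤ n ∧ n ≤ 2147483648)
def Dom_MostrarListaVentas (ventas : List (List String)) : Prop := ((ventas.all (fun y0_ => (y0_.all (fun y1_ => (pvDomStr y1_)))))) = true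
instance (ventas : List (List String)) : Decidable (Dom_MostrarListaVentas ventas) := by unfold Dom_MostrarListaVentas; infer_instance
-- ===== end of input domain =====

-- B fuses A's two staged passes (scan for the last non-empty row, then format rows 0..last)
-- into one backward pass with an Option accumulator building the output back-to-front
-- (objective: alternative).

-- ===== PORT A =====
-- str.ljust(w) ported by hand: right-pad with spaces to width w (exact: Python counts code
-- points, as does List Char length; padding char is ' ').
def RellenarEspacios (dato : String) (tamano : Int) : List Char :=
  dato.toList ++ List.replicate (tamano.toNat - dato.toList.length) ' '

def ObtenerUltimaPosicion (matriz : List (List String)) : Int :=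
  (PySem.List.pyRange 0 matriz.length).foldl
    (fun ultima_posicion i =>
      if PySem.List.pyGetD (PySem.List.pyGetD matriz i []) 0 "" ≠ "" then i else ultima_posicion)
    (-1)

def MostrarVenta (venta : List String) : List Char :=
  let idticket := RellenarEspacios (PySem.List.pyGetD venta 0 "") 6
  let codigo := RellenarEspacios (PySem.List.pyGetD venta 1 "") 5
  let producto := RellenarEspacios (PySem.List.pyGetD venta 2 "") 30
  let precio := RellenarEspacios (PySem.List.pyGetD venta 3 "") 10
  let cantidad := RellenarEspacios (PySem.List.pyGetD venta 4 "") 10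
  idticket ++ codigo ++ producto ++ precio ++ cantidad

def MostrarListaVentas (ventas : List (List String)) : String :=
  let posventas := ObtenerUltimaPosicion ventas
  let salida := (PySem.List.pyRange 0 (posventas + 1)).foldl
    (fun salida ciclo =>
      let row := PySem.List.pyGetD ventas ciclo []
      let venta := [PySem.List.pyGetD row 0 "", PySem.List.pyGetD row 1 "",
                    PySem.List.pyGetD row 2 "", PySem.List.pyGetD row 3 "",
                    PySem.List.pyGetD row 4 ""]
      salida ++ (MostrarVenta venta ++ ['\n']))
    []
  String.ofList salida

-- ===== PORT B =====
-- str.ljust(w) as in Source B's formatting expression (hand port, exact as above)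
def pvPad (s : String) (w : Nat) : List Char :=
  s.toList ++ List.replicate (w - s.toList.length) ' '

def pvFmtRow (fila : List String) : List Char :=
  pvPad (fila.getD 0 "") 6 ++ pvPad (fila.getD 1 "") 5 ++ pvPad (fila.getD 2 "") 30 ++
  pvPad (fila.getD 3 "") 10 ++ pvPad (fila.getD 4 "") 10 ++ ['\n']

-- one step of Source B's backward loop: `continue` while out is None and the first cell is empty,
-- otherwise prepend the formatted line
def pvStepB (out : Option (List Char)) (fila : List String) : Option (List Char) :=
  match out with
  | none => if fila.getD 0 "" = "" then none else some (pvFmtRow fila)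
  | some s => some (pvFmtRow fila ++ s)

def MostrarListaVentas_alt (ventas : List (List String)) : String :=
  let out := ventas.reverse.foldl pvStepB none
  String.ofList (out.getD [])

-- ===== PRECONDITION & SPEC =====
-- Pre_ excludes exactly the inputs where Python A raises IndexError: a row that is empty
-- (the last-position scan reads row[0] of every row), or a row with fewer than 5 cells at
-- or before a row whose first cell is non-empty (such rows get formatted).
def Pre_MostrarListaVentas (ventas : List (List String)) : Prop :=
  (∀ r ∈ ventas, r ≠ []) ∧
  ∀ j, j < ventas.length → (ventas.getD j []).getD 0 "" ≠ "" →
    ∀ i, i < j + 1 → 5 ≤ (ventas.getD i []).length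
instance (ventas : List (List String)) : Decidable (Pre_MostrarListaVentas ventas) := by
  unfold Pre_MostrarListaVentas; infer_instance

def pvWitness_MostrarListaVentas : List (List String) :=
  [["T1", "C1", "Producto", "9.99", "2"], ["", "", "", "", ""]]

def Spec_MostrarListaVentas (ventas : List (List String)) (out : String) : Prop := out = MostrarListaVentas_alt ventas
instance (ventas : List (List String)) (out : String) : Decidable (Spec_MostrarListaVentas ventas out) := by unfold Spec_MostrarListaVentas; infer_instance

-- ===== CLAIM (what is proved, stated in full; the proofs are below) =====
def Claim_equal_MostrarListaVentas : Prop := ∀ (ventas : List (List String)), Dom_MostrarListaVentas ventas → Pre_MostrarListaVentas ventas → Spec_MostrarListaVentas ventas (MostrarListaVentas ventas)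

-- ===== LEMMAS AND PROOFS =====

-- proof-only helper: 1 + index of the last row with a non-empty first cell (0 if none)
def pvCutF : List (List String) → Nat
  | [] => 0
  | r :: rest =>
    let c := pvCutF rest
    if c > 0 then c + 1 else if r.getD 0 "" ≠ "" then 1 else 0

theorem pvCutF_le (rows : List (List String)) : pvCutF rows ≤ rows.length := by
  induction rows with
  | nil => simp [pvCutF]
  | cons r rest ih =>
    simp only [pvCutF, List.length_cons]
    split
    · omega
    · split <;> omega

theorem pvCutF_append (xs : List (List String)) (x : List String) :
    pvCutF (xs ++ [x]) = if x.getD 0 "" ≠ "" then xs.length + 1 else pvCutF xs := by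
  induction xs with
  | nil => simp [pvCutF]
  | cons y ys ih =>
    simp only [List.cons_append, pvCutF, ih, List.length_cons]
    by_cases hx : x.getD 0 "" ≠ "" <;> simp only [hx, if_false, ite_not] <;>
      (try split) <;> (try split) <;> omega

-- A's per-row formatted string (built from the copied 5-cell list) is B's formatted line
theorem pv_fmt_eq (r : List String) :
    MostrarVenta [PySem.List.pyGetD r 0 "", PySem.List.pyGetD r 1 "",
                  PySem.List.pyGetD r 2 "", PySem.List.pyGetD r 3 "",
                  PySem.List.pyGetD r 4 ""] ++ ['\n'] = pvFmtRow r := by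
  simp [MostrarVenta, pvFmtRow, RellenarEspacios, pvPad, PySem.List.pyGetD_ofNat', List.getD]

-- the forward full scan agrees with the last-hit cut point: last position + 1 = pvCutF
theorem pv_last_cut (rows : List (List String)) :
    ObtenerUltimaPosicion rows + 1 = (pvCutF rows : Int) := by
  induction rows using List.reverseRecOn with
  | nil => decide
  | append_singleton xs x ih =>
    have hlen : ((xs ++ [x]).length : Int) = (xs.length : Int) + 1 := by
      simp
    have hrange : PySem.List.pyRange 0 ((xs ++ [x]).length : Int) =
        PySem.List.pyRange 0 (xs.length : Int) ++ [(xs.length : Int)] := by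
      rw [hlen, PySem.List.pyRange_one_succ_right (by positivity)]
    have hlast : PySem.List.pyGetD (xs ++ [x]) ((xs.length : Int)) [] = x := by
      simp [PySem.List.pyGetD_natCast, List.getD]
    have hcong : ∀ (acc : Int), ∀ i ∈ PySem.List.pyRange 0 (xs.length : Int),
        (if PySem.List.pyGetD (PySem.List.pyGetD (xs ++ [x]) i []) 0 "" ≠ "" then i else acc) =
        (if PySem.List.pyGetD (PySem.List.pyGetD xs i []) 0 "" ≠ "" then i else acc) := by
      intro acc i hi
      rw [PySem.List.mem_pyRange_one] at hi
      have hi' : i.toNat < xs.length := by omega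
      have : PySem.List.pyGetD (xs ++ [x]) i [] = PySem.List.pyGetD xs i [] := by
        rw [PySem.List.pyGetD_eq_getElem _ _ hi.1 (by simp; omega),
            PySem.List.pyGetD_eq_getElem _ _ hi.1 (by exact_mod_cast hi.2)]
        exact List.getElem_append_left hi'
      rw [this]
    have hA : ObtenerUltimaPosicion (xs ++ [x]) =
        if PySem.List.pyGetD x 0 "" ≠ "" then (xs.length : Int) else ObtenerUltimaPosicion xs := by
      unfold ObtenerUltimaPosicion
      rw [hrange, List.foldl_append, PySem.List.foldl_congr_mem _ _ _ _ hcong]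
      simp [hlast]
    rw [hA, pvCutF_append]
    rw [PySem.List.pyGetD_zero] at *
    split
    · push_cast; omega
    · exact ih

-- the first cut rows, fetched by index over range(cut), are the take-prefix
theorem pv_prefix_map (rows : List (List String)) (c : Nat) (hc : c ≤ rows.length) :
    (PySem.List.pyRange 0 (c : Int)).map (fun i => PySem.List.pyGetD rows i []) =
    rows.take c := by
  rw [PySem.List.pyRange_zero_natCast, List.map_map]
  apply List.ext_getElem
  · simp; omega
  · intro k h1 h2
    simp only [List.getElem_map, List.getElem_range, Function.comp_apply,
               List.getElem_take, PySem.List.pyGetD_natCast]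
    have hk : k < rows.length := by simp at h1; omega
    simp [List.getD, hk]

-- characterisation of Source B's backward loop (as a foldr over the original list)
theorem pv_foldr_char (rows : List (List String)) :
    rows.foldr (fun x a => pvStepB a x) none =
    if pvCutF rows = 0 then none
    else some (((rows.take (pvCutF rows)).map pvFmtRow).flatten) := by
  induction rows with
  | nil => rfl
  | cons r rest ih =>
    simp only [List.foldr_cons, ih, pvCutF]
    by_cases h : pvCutF rest > 0
    · have h0 : pvCutF rest ≠ 0 := by omega
      simp [h, h0, pvStepB]
    · have h0 : pvCutF rest = 0 := by omega
      simp only [h0, if_neg (by omega : ¬ (0:Nat) > 0)]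
      by_cases hr : r.getD 0 "" = ""
      · simp only [List.getD] at hr
        simp [hr, pvStepB]
      · simp only [List.getD] at hr
        simp [hr, pvStepB]

-- ===== VERDICT (by name: the statement is the Claim_ definition above) =====
theorem MostrarListaVentas_spec : Claim_equal_MostrarListaVentas := by
  intro ventas _ _
  unfold Spec_MostrarListaVentas
  have hcut := pv_last_cut ventas
  have hle : pvCutF ventas ≤ ventas.length := pvCutF_le ventas
  simp only [MostrarListaVentas, MostrarListaVentas_alt]
  rw [hcut, List.foldl_reverse, pv_foldr_char]
  rw [PySem.List.foldl_append_eq_flatMap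
      (fun ciclo => MostrarVenta [PySem.List.pyGetD (PySem.List.pyGetD ventas ciclo []) 0 "",
        PySem.List.pyGetD (PySem.List.pyGetD ventas ciclo []) 1 "",
        PySem.List.pyGetD (PySem.List.pyGetD ventas ciclo []) 2 "",
        PySem.List.pyGetD (PySem.List.pyGetD ventas ciclo []) 3 "",
        PySem.List.pyGetD (PySem.List.pyGetD ventas ciclo []) 4 ""] ++ ['\n'])]
  have hfmt : ∀ i : Int, (MostrarVenta [PySem.List.pyGetD (PySem.List.pyGetD ventas i []) 0 "",
        PySem.List.pyGetD (PySem.List.pyGetD ventas i []) 1 "",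
        PySem.List.pyGetD (PySem.List.pyGetD ventas i []) 2 "",
        PySem.List.pyGetD (PySem.List.pyGetD ventas i []) 3 "",
        PySem.List.pyGetD (PySem.List.pyGetD ventas i []) 4 ""] ++ ['\n']) =
      pvFmtRow (PySem.List.pyGetD ventas i []) := fun i => pv_fmt_eq _
  simp only [List.flatMap_def, List.nil_append, hfmt]
  have hmap : List.map (fun ciclo => pvFmtRow (PySem.List.pyGetD ventas ciclo []))
      (PySem.List.pyRange 0 ((pvCutF ventas : Nat) : Int)) =
      List.map pvFmtRow (ventas.take (pvCutF ventas)) := by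
    rw [← pv_prefix_map ventas _ hle, List.map_map]
    rfl
  rw [hmap]
  by_cases h0 : pvCutF ventas = 0
  · simp [h0]
  · simp [h0]
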